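-- pv_equiv track=rewrite | github.com/javierlnmn/u-tad_blackboard-scorm-scraper | scraper/output.py | _slugify_md_heading
-- ===== SOURCE A (Python) =====
-- def _slugify_md_heading(text: str) -> str:
--     s = (text or '').strip().lower()
--     out: list[str] = []
--     prev_dash = False
--     for ch in s:
--         if ch.isalnum():
--             out.append(ch)
--             prev_dash = False
--             continue
--         if ch in {' ', '-'}:
--             if not prev_dash:
--                 out.append('-')
--                 prev_dash = True
--             continue
--         # drop punctuation (.,:() etc.)
--     slug = ''.join(out).strip('-')
--     return slug or 'section'
-- ===== SOURCE B (Python) =====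
-- def _slugify_md_heading(text: str) -> str:
--     normalized = ''.join(
--         c if c.isalnum() else (' ' if c in ' -' else '')
--         for c in text.lower()
--     )
--     return '-'.join(normalized.split()) or 'section'
-- ===== Notes on version B (the rewrite author's own statement) =====
-- stated objective: simpler
-- what changed: Replaces A's stateful prev_dash character loop (which collapses separator runs and strips edge dashes itself) by a three-stage pipeline: classify each character to itself, a space, or nothing; let str.split with no arguments collapse and trim the separators; then dash-join the resulting words.
import Mathlib
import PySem

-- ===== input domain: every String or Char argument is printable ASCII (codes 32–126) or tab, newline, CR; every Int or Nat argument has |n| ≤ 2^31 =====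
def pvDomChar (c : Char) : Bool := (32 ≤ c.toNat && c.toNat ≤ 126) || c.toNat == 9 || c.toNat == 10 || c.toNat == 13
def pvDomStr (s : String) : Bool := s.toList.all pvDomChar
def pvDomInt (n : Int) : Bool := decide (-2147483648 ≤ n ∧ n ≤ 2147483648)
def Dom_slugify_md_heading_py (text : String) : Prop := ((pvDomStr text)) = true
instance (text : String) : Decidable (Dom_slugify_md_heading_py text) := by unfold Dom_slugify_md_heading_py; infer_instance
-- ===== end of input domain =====

-- B replaces A's stateful prev_dash character loop by a normalize / split() / '-'.join pipeline (objective: simpler; same cost).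

-- ===== PORT A =====
-- A's loop body: append alnum chars, collapse ' '/'-' runs into one dash via the prev_dash flag, drop the rest.
def slugifyStepA (st : List Char × Bool) (ch : Char) : List Char × Bool :=
  if PySem.Chars.isalnum ch then (st.1 ++ [ch], false)
  else if ch = ' ' ∨ ch = '-' then
    (if !st.2 then (st.1 ++ ['-'], true) else st)
  else st

def slugify_md_heading_py (text : String) : String :=
  -- (text or '') is `text` itself for a string argument
  let s := PySem.Chars.lower (PySem.Chars.strip text.toList)
  let r := s.foldl slugifyStepA ([], false)
  let slug := PySem.Chars.stripChars r.1 ['-']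
  if slug = [] then "section" else String.ofList slug

-- ===== PORT B =====
def slugify_md_heading_py_alt (text : String) : String :=
  let normalized := (PySem.Chars.lower text.toList).flatMap (fun c =>
    if PySem.Chars.isalnum c then [c] else if c = ' ' ∨ c = '-' then [' '] else [])
  let slug := PySem.Chars.join ['-'] (PySem.Chars.split₀ normalized)
  if slug = [] then "section" else String.ofList slug

-- ===== PRECONDITION & SPEC =====
def Spec_slugify_md_heading_py (text : String) (out : String) : Prop := out = slugify_md_heading_py_alt text
instance (text : String) (out : String) : Decidable (Spec_slugify_md_heading_py text out) := by unfold Spec_slugify_md_heading_py; infer_instance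

-- ===== CLAIM (what is proved, stated in full; the proofs are below) =====
def Claim_equal_slugify_md_heading_py : Prop := ∀ (text : String), Dom_slugify_md_heading_py text → Spec_slugify_md_heading_py text (slugify_md_heading_py text)

-- ===== LEMMAS AND PROOFS =====

-- B's per-character normalisation (same function as the inline lambda in the B port)
def pvCls (c : Char) : List Char :=
  if PySem.Chars.isalnum c then [c] else if c = ' ' ∨ c = '-' then [' '] else []

-- functional form of A's loop
def pvBody : List Char → Bool → List Char
  | [], _ => []
  | c :: t, prev =>
    if PySem.Chars.isalnum c then c :: pvBody t false
    else if c = ' ' ∨ c = '-' then (if prev then pvBody t true else '-' :: pvBody t true)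
    else pvBody t prev

-- the words of Python's s.split(), recursively
def pvWords : List Char → List (List Char)
  | [] => []
  | c :: t =>
    if PySem.Chars.isspace c then pvWords t
    else (c :: t.takeWhile (fun d => !PySem.Chars.isspace d)) :: pvWords (t.dropWhile (fun d => !PySem.Chars.isspace d))
termination_by l => l.length
decreasing_by
  · simp
  · have := List.length_dropWhile_le (p := fun d => !PySem.Chars.isspace d) (l := t)
    simp; omega

def pvJ (ws : List (List Char)) : List Char := List.intercalate ['-'] ws
def pvAS (c : Char) : Prop := PySem.Chars.isalnum c = true ∨ c = ' '
def pvLead (ns : List Char) : List Char := if ns.head? = some ' ' then ['-'] else []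
def pvTrail (ns : List Char) : List Char :=
  if pvWords ns ≠ [] ∧ ns.getLast? = some ' ' then ['-'] else []

-- character-class facts
theorem pv_alnum_not_space (c : Char) (h : PySem.Chars.isalnum c = true) : PySem.Chars.isspace c = false := by
  have hA : ('A').val.toNat = 65 := rfl
  have hZ : ('Z').val.toNat = 90 := rfl
  have ha : ('a').val.toNat = 97 := rfl
  have hz : ('z').val.toNat = 122 := rfl
  have h0 : ('0').val.toNat = 48 := rfl
  have h9 : ('9').val.toNat = 57 := rfl
  simp only [PySem.Chars.isalnum, PySem.Chars.isalpha, PySem.Chars.isupper, PySem.Chars.islower,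
    PySem.Chars.isdigit, PySem.Chars.isspace, Char.le_def, UInt32.le_iff_toNat_le, Char.toNat,
    Bool.or_eq_true, Bool.and_eq_true, decide_eq_true_eq, hA, hZ, ha, hz, h0, h9] at *
  simp only [Bool.or_eq_false_iff, Bool.and_eq_false_iff, decide_eq_false_iff_not, not_le]
  omega

theorem pv_alnum_ne_space (c : Char) (h : PySem.Chars.isalnum c = true) : c ≠ ' ' := by
  intro he; subst he; exact absurd h (by decide)

theorem pv_alnum_ne_dash (c : Char) (h : PySem.Chars.isalnum c = true) : c ≠ '-' := by
  intro he; subst he; exact absurd h (by decide)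

theorem pv_AS_space_iff (c : Char) (h : pvAS c) : (PySem.Chars.isspace c = true ↔ c = ' ') := by
  rcases h with h | h
  · simp [pv_alnum_not_space c h, pv_alnum_ne_space c h]
  · subst h; simp; decide

-- A's fold computes pvBody
theorem pv_fold_eq_body (cs : List Char) : ∀ out prev,
    (List.foldl slugifyStepA (out, prev) cs).1 = out ++ pvBody cs prev := by
  induction cs with
  | nil => intro out prev; simp [pvBody]
  | cons c t ih =>
    intro out prev
    simp only [List.foldl_cons, slugifyStepA, pvBody]
    by_cases h1 : PySem.Chars.isalnum c = true
    · simp [h1, ih]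
    · by_cases h2 : c = ' ' ∨ c = '-'
      · simp only [h1, h2, if_pos, Bool.not_eq_true']
        cases prev with
        | false => simp [ih]
        | true => simp [ih]
      · simp [h1, h2, ih]

-- pvBody only sees the normalised characters
theorem pv_body_norm (cs : List Char) : ∀ prev, pvBody cs prev = pvBody (cs.flatMap pvCls) prev := by
  induction cs with
  | nil => intro prev; simp [pvBody]
  | cons c t ih =>
    intro prev
    simp only [List.flatMap_cons, pvCls]
    by_cases h1 : PySem.Chars.isalnum c = true
    · simp [h1, pvBody, ih]
    · by_cases h2 : c = ' ' ∨ c = '-'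
      · simp only [h1, h2, if_pos]
        simp only [pvBody, h1, h2, if_pos]
        have hs : PySem.Chars.isalnum ' ' = false := by decide
        simp [pvBody, hs, ih]
      · simp [h1, h2, pvBody, ih]

theorem pv_flatMap_AS (cs : List Char) : ∀ c ∈ cs.flatMap pvCls, pvAS c := by
  intro c hc
  rcases List.mem_flatMap.mp hc with ⟨x, _, hx⟩
  unfold pvCls at hx
  by_cases h1 : PySem.Chars.isalnum x = true
  · simp [h1] at hx; subst hx; exact Or.inl h1
  · by_cases h2 : x = ' ' ∨ x = '-'
    · simp [h1, h2] at hx; subst hx; exact Or.inr rfl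
    · simp [h1, h2] at hx

theorem pv_go_eq (cs : List Char) : ∀ cur acc,
    PySem.Chars.split₀.go cs cur acc = acc.reverse ++
      (if cur.isEmpty then pvWords cs
       else (cur.reverse ++ cs.takeWhile (fun d => !PySem.Chars.isspace d)) ::
            pvWords (cs.dropWhile (fun d => !PySem.Chars.isspace d))) := by
  induction cs with
  | nil =>
    intro cur acc
    rw [PySem.Chars.split₀.go]
    by_cases h : cur.isEmpty <;> simp [h, pvWords]
  | cons c t ih =>
    intro cur acc
    rw [PySem.Chars.split₀.go]
    by_cases hs : PySem.Chars.isspace c = true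
    · by_cases hc : cur.isEmpty
      · simp only [hs, if_pos, hc, if_pos, ih]
        simp [pvWords, hs]
      · simp only [hs, if_pos, hc, ih]
        simp [pvWords, hs]
    · simp only [hs, ih]
      by_cases hc : cur.isEmpty
      · have hcur : cur = [] := by simpa [List.isEmpty_iff] using hc
        subst hcur
        simp [pvWords, hs]
      · simp [hc, hs]

theorem pv_split₀_eq (ns : List Char) : PySem.Chars.split₀ ns = pvWords ns := by
  have := pv_go_eq ns [] []
  simpa [PySem.Chars.split₀] using this

theorem pv_words_ne_nil (ns : List Char) : ∀ w ∈ pvWords ns, w ≠ [] := by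
  induction ns using pvWords.induct with
  | case1 => simp [pvWords]
  | case2 c t hs ih => rw [pvWords, if_pos hs]; exact ih
  | case3 c t hs ih =>
    rw [pvWords, if_neg hs]
    intro w hw
    rcases List.mem_cons.mp hw with hw' | hw'
    · subst hw'; simp
    · exact ih w hw'

theorem pv_words_alnum (ns : List Char) (hAS : ∀ c ∈ ns, pvAS c) :
    ∀ w ∈ pvWords ns, ∀ c ∈ w, PySem.Chars.isalnum c = true := by
  induction ns using pvWords.induct with
  | case1 => simp [pvWords]
  | case2 c t hs ih =>
    rw [pvWords, if_pos hs]
    exact ih (fun d hd => hAS d (List.mem_cons_of_mem _ hd))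
  | case3 c t hs ih =>
    rw [pvWords, if_neg hs]
    intro w hw d hd
    rcases List.mem_cons.mp hw with hw' | hw'
    · subst hw'
      rcases List.mem_cons.mp hd with rfl | hd'
      · rcases hAS d (List.mem_cons_self ..) with h | h
        · exact h
        · subst h; exact absurd (by decide : PySem.Chars.isspace ' ' = true) hs
      · rcases hAS d (List.mem_cons_of_mem _ ((List.takeWhile_sublist _).mem hd')) with h | h
        · exact h
        · have h2 := List.mem_takeWhile_imp hd'
          subst h; exact absurd h2 (by decide)
    · exact ih (fun e he => hAS e (List.mem_cons_of_mem _ ((List.dropWhile_sublist _).mem he))) w hw' d hd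

theorem pv_words_nil_iff (ns : List Char) (hAS : ∀ c ∈ ns, pvAS c) :
    pvWords ns = [] ↔ ∀ c ∈ ns, c = ' ' := by
  induction ns with
  | nil => simp [pvWords]
  | cons c t ih =>
    by_cases hs : PySem.Chars.isspace c = true
    · have hc : c = ' ' := (pv_AS_space_iff c (hAS c (List.mem_cons_self ..))).mp hs
      rw [pvWords, if_pos hs, ih (fun d hd => hAS d (List.mem_cons_of_mem _ hd))]
      constructor
      · intro h a ha
        rcases List.mem_cons.mp ha with rfl | ha'
        · exact hc
        · exact h a ha'
      · intro h a ha; exact h a (List.mem_cons_of_mem _ ha)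
    · rw [pvWords, if_neg hs]
      constructor
      · intro h; exact absurd h (by simp)
      · intro h
        have hc := h c (List.mem_cons_self ..)
        rw [hc] at hs
        exact absurd (by decide : PySem.Chars.isspace ' ' = true) hs

theorem pv_J_cons (w : List Char) (ws : List (List Char)) :
    pvJ (w :: ws) = w ++ (if ws = [] then [] else '-' :: pvJ ws) := by
  cases ws with
  | nil => simp [pvJ, List.intercalate]
  | cons x xs => simp [pvJ, List.intercalate, List.intersperse]
theorem gl_cons (c : Char) (t : List Char) (h : t ≠ []) : (c::t).getLast? = t.getLast? := by
  rcases List.exists_cons_of_ne_nil h with ⟨d, t', rfl⟩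
  simp

theorem pv_trail_cons (c : Char) (t : List Char) (hw : pvWords (c :: t) = [] ↔ pvWords t = []) :
    pvTrail (c :: t) = pvTrail t := by
  unfold pvTrail
  by_cases h : pvWords t = []
  · simp [h, hw.mpr h]
  · have ht : t ≠ [] := by rintro rfl; exact h (by rw [pvWords])
    rw [gl_cons c t ht]
    have : pvWords (c :: t) ≠ [] := fun he => h (hw.mp he)
    simp [h, this]

theorem pv_body_eq (n : Nat) : ∀ ns : List Char, ns.length ≤ n → (∀ c ∈ ns, pvAS c) →
    pvBody ns true = pvJ (pvWords ns) ++ pvTrail ns ∧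
    pvBody ns false = pvLead ns ++ pvJ (pvWords ns) ++ pvTrail ns := by
  induction n with
  | zero =>
    intro ns hn _
    have : ns = [] := List.eq_nil_of_length_eq_zero (Nat.le_zero.mp hn)
    subst this
    simp [pvBody, pvWords, pvJ, pvLead, pvTrail, List.intercalate]
  | succ n ih =>
    intro ns hn hAS
    cases ns with
    | nil => simp [pvBody, pvWords, pvJ, pvLead, pvTrail, List.intercalate]
    | cons c t =>
      have hASt : ∀ d ∈ t, pvAS d := fun d hd => hAS d (List.mem_cons_of_mem _ hd)
      have hlt : t.length ≤ n := by simp at hn; omega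
      have IH := ih t hlt hASt
      rcases hAS c (List.mem_cons_self ..) with ha | ha
      · -- c alnum
        have hs : PySem.Chars.isspace c = false := pv_alnum_not_space c ha
        have hne : c ≠ ' ' := pv_alnum_ne_space c ha
        have hbody : ∀ prev, pvBody (c :: t) prev = c :: pvBody t false := by
          intro prev; rw [pvBody, if_pos ha]
        have hlead : pvLead (c :: t) = [] := by simp [pvLead, hne]
        have hwords : pvWords (c :: t) =
            (c :: t.takeWhile (fun d => !PySem.Chars.isspace d)) ::
            pvWords (t.dropWhile (fun d => !PySem.Chars.isspace d)) := by
          rw [pvWords, if_neg (by simp [hs])]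
        cases t with
        | nil =>
          have hw1 : pvWords [c] = [[c]] := by rw [hwords]; simp [pvWords]
          have hJ1 : pvJ [[c]] = [c] := by rw [pv_J_cons]; simp
          have hT1 : pvTrail [c] = [] := by unfold pvTrail; rw [hw1]; simp [hne]
          refine ⟨?_, ?_⟩ <;> rw [hbody, hw1, hJ1, hT1] <;> simp [pvBody, hlead]
        | cons d t' =>
          have htne : (d :: t') ≠ [] := by simp
          rcases hASt d (List.mem_cons_self ..) with hd | hd
          · -- d alnum
            have hsd : PySem.Chars.isspace d = false := pv_alnum_not_space d hd
            have hwt : pvWords (d :: t') =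
                (d :: t'.takeWhile (fun e => !PySem.Chars.isspace e)) ::
                pvWords (t'.dropWhile (fun e => !PySem.Chars.isspace e)) := by
              rw [pvWords, if_neg (by simp [hsd])]
            have hJ : pvJ (pvWords (c :: d :: t')) = c :: pvJ (pvWords (d :: t')) := by
              rw [hwords, hwt]
              simp only [List.takeWhile_cons, hsd, Bool.not_false, if_pos,
                List.dropWhile_cons]
              rw [pv_J_cons, pv_J_cons]
              simp
            have hT : pvTrail (c :: d :: t') = pvTrail (d :: t') := by
              apply pv_trail_cons
              rw [hwords, hwt]; simp
            have hleadt : pvLead (d :: t') = [] := by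
              simp [pvLead, pv_alnum_ne_space d hd]
            refine ⟨?_, ?_⟩ <;>
              rw [hbody, IH.2, hJ, hT, hleadt] <;> simp [hlead]
          · -- d = ' '
            subst hd
            have hwt : pvWords (' ' :: t') = pvWords t' := by
              rw [pvWords, if_pos (by decide)]
            have hsp : PySem.Chars.isspace ' ' = true := by decide
            have hwords2 : pvWords (c :: ' ' :: t') = [c] :: pvWords (' ' :: t') := by
              rw [hwords]
              simp [hsp]
            have hleadt : pvLead (' ' :: t') = ['-'] := by simp [pvLead]
            by_cases hwnil : pvWords (' ' :: t') = []
            · -- tail is all spaces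
              have hall : ∀ a ∈ ' ' :: t', a = ' ' :=
                (pv_words_nil_iff _ hASt).mp hwnil
              have hgl : (' ' :: t').getLast? = some ' ' := by
                rw [List.getLast?_eq_some_getLast htne]
                exact congrArg some (hall _ (List.getLast_mem htne))
              have hT : pvTrail (c :: ' ' :: t') = ['-'] := by
                unfold pvTrail
                rw [gl_cons c _ htne, hgl]
                simp [hwords2]
              have hTt : pvTrail (' ' :: t') = [] := by simp [pvTrail, hwnil]
              have hJc : pvJ (pvWords (c :: ' ' :: t')) = [c] := by
                rw [hwords2, hwnil, pv_J_cons]; simp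
              refine ⟨?_, ?_⟩ <;>
                rw [hbody, IH.2, hJc, hT, hleadt, hwnil] <;>
                  simp [pvJ, List.intercalate, hTt, hlead]
            · have hJc : pvJ (pvWords (c :: ' ' :: t')) =
                  c :: '-' :: pvJ (pvWords (' ' :: t')) := by
                rw [hwords2, pv_J_cons, if_neg hwnil]; simp
              have hT : pvTrail (c :: ' ' :: t') = pvTrail (' ' :: t') := by
                apply pv_trail_cons
                rw [hwords2]
                simp [hwnil]
              refine ⟨?_, ?_⟩ <;>
                rw [hbody, IH.2, hJc, hT, hleadt] <;> simp [hlead]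
      · -- c = ' '
        subst ha
        have hbody_t : pvBody (' ' :: t) true = pvBody t true := by
          rw [pvBody, if_neg (by decide), if_pos (by simp), if_pos rfl]
        have hbody_f : pvBody (' ' :: t) false = '-' :: pvBody t true := by
          rw [pvBody, if_neg (by decide), if_pos (by simp)]
          simp
        have hwt : pvWords (' ' :: t) = pvWords t := by
          rw [pvWords, if_pos (by decide)]
        have hT : pvTrail (' ' :: t) = pvTrail t := by
          apply pv_trail_cons; rw [hwt]
        have hlead : pvLead (' ' :: t) = ['-'] := by simp [pvLead]
        exact ⟨by rw [hbody_t, IH.1, hwt, hT],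
               by rw [hbody_f, IH.1, hwt, hT, hlead]; simp⟩
-- head and last of pvJ of nonempty alnum words are alnum
theorem pv_J_head (w : List Char) (ws : List (List Char))
    (hne : ∀ u ∈ w :: ws, u ≠ []) (hal : ∀ u ∈ w :: ws, ∀ c ∈ u, PySem.Chars.isalnum c = true) :
    ∃ h rest, pvJ (w :: ws) = h :: rest ∧ PySem.Chars.isalnum h = true := by
  rcases List.exists_cons_of_ne_nil (hne w (List.mem_cons_self ..)) with ⟨h, w', rfl⟩
  rw [pv_J_cons]
  exact ⟨h, _, rfl, hal _ (List.mem_cons_self ..) h (List.mem_cons_self ..)⟩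

theorem pv_J_last (ws : List (List Char)) : ∀ w,
    (∀ u ∈ w :: ws, u ≠ []) → (∀ u ∈ w :: ws, ∀ c ∈ u, PySem.Chars.isalnum c = true) →
    ∃ h rest, (pvJ (w :: ws)).reverse = h :: rest ∧ PySem.Chars.isalnum h = true := by
  induction ws with
  | nil =>
    intro w hne hal
    have hwne : w.reverse ≠ [] := by
      simpa using hne w (List.mem_cons_self ..)
    rcases List.exists_cons_of_ne_nil hwne with ⟨h, rest, hrev⟩
    have hm : h ∈ w := by
      rw [← List.mem_reverse, hrev]; exact List.mem_cons_self ..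
    refine ⟨h, rest, ?_, hal w (List.mem_cons_self ..) h hm⟩
    rw [pv_J_cons]; simpa using hrev
  | cons x xs ih =>
    intro w hne hal
    rcases ih x (fun u hu => hne u (List.mem_cons_of_mem _ hu))
        (fun u hu => hal u (List.mem_cons_of_mem _ hu)) with ⟨h, rest, hrev, hh⟩
    refine ⟨h, rest ++ ('-' :: w.reverse), ?_, hh⟩
    rw [pv_J_cons, if_neg (by simp)]
    simp [hrev]

theorem pv_strip_dashes' (ns : List Char) (hAS : ∀ c ∈ ns, pvAS c)
    (b : List Char) (hb : b = pvLead ns ++ pvJ (pvWords ns) ++ pvTrail ns) :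
    PySem.Chars.stripChars b ['-'] = pvJ (pvWords ns) := by
  subst hb
  rcases hw : pvWords ns with _ | ⟨w, ws⟩
  · have hT : pvTrail ns = [] := by simp [pvTrail, hw]
    rw [hT]
    unfold pvLead
    by_cases hh : ns.head? = some ' '
    · rw [if_pos hh]; decide
    · rw [if_neg hh]; decide
  · have hne := pv_words_ne_nil ns
    have hal := pv_words_alnum ns hAS
    rw [hw] at hne hal
    rcases pv_J_head w ws hne hal with ⟨h, rest, hJ, hh⟩
    rcases pv_J_last ws w hne hal with ⟨h2, rest2, hJr, hh2⟩
    have hph : (['-'].contains h) = false := by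
      simp; exact pv_alnum_ne_dash h hh
    have hph2 : (['-'].contains h2) = false := by
      simp; exact pv_alnum_ne_dash h2 hh2
    unfold PySem.Chars.stripChars
    show (List.dropWhile (fun c => List.contains ['-'] c)
        (List.dropWhile (fun c => List.contains ['-'] c)
          (pvLead ns ++ pvJ (w :: ws) ++ pvTrail ns)).reverse).reverse = pvJ (w :: ws)
    -- step 1: dropWhile over lead ++ J ++ T = J ++ T
    have step1 : List.dropWhile (fun c => List.contains ['-'] c)
        (pvLead ns ++ pvJ (w :: ws) ++ pvTrail ns) = pvJ (w :: ws) ++ pvTrail ns := by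
      have hJT : List.dropWhile (fun c => List.contains ['-'] c)
          (pvJ (w :: ws) ++ pvTrail ns) = pvJ (w :: ws) ++ pvTrail ns := by
        rw [hJ]; rw [List.cons_append, List.dropWhile_cons_of_neg (by simpa using pv_alnum_ne_dash h hh)]
      unfold pvLead
      by_cases hhd : ns.head? = some ' '
      · rw [if_pos hhd]
        simpa [List.dropWhile_cons] using hJT
      · rw [if_neg hhd]; simpa using hJT
    rw [step1]
    -- step 2: reverse side
    have step2 : List.dropWhile (fun c => List.contains ['-'] c)
        (pvJ (w :: ws) ++ pvTrail ns).reverse = (pvJ (w :: ws)).reverse := by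
      rw [List.reverse_append]
      have hJrd : List.dropWhile (fun c => List.contains ['-'] c)
          ((pvJ (w :: ws)).reverse) = (pvJ (w :: ws)).reverse := by
        rw [hJr, List.dropWhile_cons_of_neg (by simpa using pv_alnum_ne_dash h2 hh2)]
      unfold pvTrail
      by_cases ht : pvWords ns ≠ [] ∧ ns.getLast? = some ' '
      · rw [if_pos ht]; simpa [List.dropWhile_cons] using hJrd
      · rw [if_neg ht]; simpa using hJrd
    rw [step2, List.reverse_reverse]
theorem pv_space_not_upper (c : Char) (h : PySem.Chars.isspace c = true) : PySem.Chars.isupper c = false := by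
  have hA : ('A').val.toNat = 65 := rfl
  have hZ : ('Z').val.toNat = 90 := rfl
  simp only [PySem.Chars.isupper, PySem.Chars.isspace, Char.le_def, UInt32.le_iff_toNat_le,
    Char.toNat, Bool.or_eq_true, Bool.and_eq_true, decide_eq_true_eq, hA, hZ] at *
  simp only [Bool.and_eq_false_iff, decide_eq_false_iff_not, not_le]
  omega

theorem pv_space_lower (c : Char) (h : PySem.Chars.isspace c = true) :
    PySem.Chars.lowerChar c = c := by
  rw [PySem.Chars.lowerChar, if_neg]
  simp [pv_space_not_upper c h]

theorem pv_space_cls (c : Char) (h : PySem.Chars.isspace c = true) :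
    ∀ d ∈ pvCls c, d = ' ' := by
  intro d hd
  unfold pvCls at hd
  have ha : PySem.Chars.isalnum c = false := by
    by_cases h' : PySem.Chars.isalnum c = true
    · rw [pv_alnum_not_space c h'] at h; exact absurd h (by simp)
    · simpa using h'
  rw [ha] at hd
  simp only [Bool.false_eq_true, if_false] at hd
  by_cases h2 : c = ' ' ∨ c = '-'
  · rcases h2 with h2 | h2
    · simp [h2] at hd; exact hd
    · subst h2; exact absurd h (by decide)
  · simp [h2] at hd

theorem pv_F_space (v : List Char) (h : ∀ d ∈ v, PySem.Chars.isspace d = true) :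
    ∀ c ∈ (PySem.Chars.lower v).flatMap pvCls, c = ' ' := by
  intro c hc
  rcases List.mem_flatMap.mp hc with ⟨e, he, hce⟩
  rcases List.mem_map.mp he with ⟨d, hd, rfl⟩
  rw [pv_space_lower d (h d hd)] at hce
  exact pv_space_cls d (h d hd) c hce

theorem pv_words_prefix (sp x : List Char) (h : ∀ c ∈ sp, c = ' ') :
    pvWords (sp ++ x) = pvWords x := by
  induction sp with
  | nil => simp
  | cons s sp' ih =>
    have hs : s = ' ' := h s (List.mem_cons_self ..)
    subst hs
    rw [List.cons_append, pvWords, if_pos (by decide)]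
    exact ih (fun c hc => h c (List.mem_cons_of_mem _ hc))

theorem pv_words_suffix (n : Nat) : ∀ x sp : List Char, x.length ≤ n → (∀ c ∈ sp, c = ' ') →
    pvWords (x ++ sp) = pvWords x := by
  induction n with
  | zero =>
    intro x sp hn hsp
    have : x = [] := List.eq_nil_of_length_eq_zero (Nat.le_zero.mp hn)
    subst this
    rw [List.nil_append, pvWords]
    exact (pv_words_nil_iff sp (fun c hc => Or.inr (hsp c hc))).mpr hsp
  | succ n ih =>
    intro x sp hn hsp
    cases x with
    | nil =>
      rw [List.nil_append, pvWords]
      exact (pv_words_nil_iff sp (fun c hc => Or.inr (hsp c hc))).mpr hsp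
    | cons c x' =>
      have hlt : x'.length ≤ n := by simp at hn; omega
      by_cases hs : PySem.Chars.isspace c = true
      · rw [List.cons_append, pvWords, if_pos hs, pvWords, if_pos hs]
        exact ih x' sp hlt hsp
      · rw [List.cons_append, pvWords, if_neg hs, pvWords, if_neg hs]
        cases sp with
        | nil => simp
        | cons s sp' =>
          have hs0 : s = ' ' := hsp s (List.mem_cons_self ..)
          have hPs : (fun d => !PySem.Chars.isspace d) s = false := by
            subst hs0; decide
          have htw : List.takeWhile (fun d => !PySem.Chars.isspace d) (x' ++ s :: sp')
              = List.takeWhile (fun d => !PySem.Chars.isspace d) x' := by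
            rw [List.takeWhile_append]
            by_cases hful : (List.takeWhile (fun d => !PySem.Chars.isspace d) x').length = x'.length
            · rw [if_pos hful, List.takeWhile_cons_of_neg (by simp [hPs])]
              rw [List.append_nil]
              exact ((List.takeWhile_sublist _).eq_of_length hful).symm
            · rw [if_neg hful]
          have hdw : List.dropWhile (fun d => !PySem.Chars.isspace d) (x' ++ s :: sp')
              = if (List.dropWhile (fun d => !PySem.Chars.isspace d) x').isEmpty
                then s :: sp' else List.dropWhile (fun d => !PySem.Chars.isspace d) x' ++ s :: sp' := by
            rw [List.dropWhile_append, List.dropWhile_cons_of_neg (by simp [hPs])]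
          rw [htw, hdw]
          by_cases hemp : (List.dropWhile (fun d => !PySem.Chars.isspace d) x').isEmpty
          · rw [if_pos hemp]
            have h1 : pvWords (s :: sp') = [] :=
              (pv_words_nil_iff _ (fun c hc => Or.inr (hsp c hc))).mpr hsp
            have h2 : List.dropWhile (fun d => !PySem.Chars.isspace d) x' = [] := by
              simpa [List.isEmpty_iff] using hemp
            rw [h1, h2, pvWords]
          · rw [if_neg hemp]
            have hlen : (List.dropWhile (fun d => !PySem.Chars.isspace d) x').length ≤ n := by
              have := List.length_dropWhile_le (p := fun d => !PySem.Chars.isspace d) (l := x')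
              omega
            rw [ih _ _ hlen hsp]

-- stripping outer whitespace of the raw text does not change the words
theorem pv_words_strip (t : List Char) :
    pvWords ((PySem.Chars.lower (PySem.Chars.strip t)).flatMap pvCls)
      = pvWords ((PySem.Chars.lower t).flatMap pvCls) := by
  have hdist : ∀ a b : List Char,
      (PySem.Chars.lower (a ++ b)).flatMap pvCls
        = (PySem.Chars.lower a).flatMap pvCls ++ (PySem.Chars.lower b).flatMap pvCls := by
    intro a b; simp [PySem.Chars.lower, List.map_append, List.flatMap_append]
  -- t = (leading whitespace) ++ lstrip t
  have hsplit1 : t = t.takeWhile PySem.Chars.isspace ++ PySem.Chars.lstrip t := by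
    rw [PySem.Chars.lstrip, List.takeWhile_append_dropWhile]
  -- lstrip t = rstrip (lstrip t) ++ (trailing whitespace)
  have hsplit2 : PySem.Chars.lstrip t = PySem.Chars.strip t ++
      ((PySem.Chars.lstrip t).reverse.takeWhile PySem.Chars.isspace).reverse := by
    rw [PySem.Chars.strip, PySem.Chars.rstrip, ← List.reverse_append,
      List.takeWhile_append_dropWhile, List.reverse_reverse]
  have hws1 : ∀ c ∈ (PySem.Chars.lower (t.takeWhile PySem.Chars.isspace)).flatMap pvCls, c = ' ' :=
    pv_F_space _ (fun d hd => List.mem_takeWhile_imp hd)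
  have hws2 : ∀ c ∈ (PySem.Chars.lower
      (((PySem.Chars.lstrip t).reverse.takeWhile PySem.Chars.isspace).reverse)).flatMap pvCls, c = ' ' :=
    pv_F_space _ (fun d hd => List.mem_takeWhile_imp (List.mem_reverse.mp hd))
  calc pvWords ((PySem.Chars.lower (PySem.Chars.strip t)).flatMap pvCls)
      = pvWords ((PySem.Chars.lower (PySem.Chars.lstrip t)).flatMap pvCls) := by
        rw [hsplit2, hdist]
        exact (pv_words_suffix _ _ _ le_rfl hws2).symm
    _ = pvWords ((PySem.Chars.lower t).flatMap pvCls) := by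
        conv_rhs => rw [hsplit1]
        rw [hdist, pv_words_prefix _ _ hws1]

-- A's loop output with the dashes stripped is exactly the dash-joined words
theorem pv_strip_dashes (ns : List Char) (hAS : ∀ c ∈ ns, pvAS c) :
    PySem.Chars.stripChars (pvBody ns false) ['-'] = pvJ (pvWords ns) :=
  pv_strip_dashes' ns hAS _ (pv_body_eq ns.length ns le_rfl hAS).2

-- ===== VERDICT (by name: the statement is the Claim_ definition above) =====
theorem slugify_md_heading_py_spec : Claim_equal_slugify_md_heading_py := by
  intro text _
  unfold Spec_slugify_md_heading_py slugify_md_heading_py slugify_md_heading_py_alt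
  show (let slug := PySem.Chars.stripChars (List.foldl slugifyStepA ([], false)
          (PySem.Chars.lower (PySem.Chars.strip text.toList))).1 ['-']
        if slug = [] then "section" else String.ofList slug)
      = (let slug := PySem.Chars.join ['-']
            (PySem.Chars.split₀ ((PySem.Chars.lower text.toList).flatMap pvCls))
        if slug = [] then "section" else String.ofList slug)
  have key : PySem.Chars.stripChars (List.foldl slugifyStepA ([], false)
        (PySem.Chars.lower (PySem.Chars.strip text.toList))).1 ['-']
      = PySem.Chars.join ['-']
          (PySem.Chars.split₀ ((PySem.Chars.lower text.toList).flatMap pvCls)) := by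
    have h1 : (List.foldl slugifyStepA ([], false)
        (PySem.Chars.lower (PySem.Chars.strip text.toList))).1
        = pvBody ((PySem.Chars.lower (PySem.Chars.strip text.toList)).flatMap pvCls) false := by
      rw [pv_fold_eq_body, ← pv_body_norm]; simp
    rw [h1]
    rw [pv_strip_dashes _ (pv_flatMap_AS _), pv_words_strip]
    rw [pv_split₀_eq]
    rfl
  rw [key]
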